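-- pv_equiv track=rewrite | github.com/asweigart/programmedpatterns | book/visualpatterns.py | pattern32
-- ===== SOURCE A (Python) =====
-- def pattern32(step):
--     pattern = 'O'
--     i = 2
--     while True:
--         if i > step:
--             break
--         pattern += 'OOO'
--         i += 1
--
--         if i > step:
--             break
--         pattern += ''
--         i += 1
--     return pattern
-- ===== SOURCE B (Python) =====
-- def pattern32(step):
--     # Closed form: the loop appends one 'OOO' per even integer in [2, step],
--     # i.e. step // 2 copies (negative multiplier gives '').
--     return 'O' + 'OOO' * (step // 2)
-- ===== Notes on version B (the rewrite author's own statement) =====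
-- stated objective: simpler
-- what changed: Replaced the two-phase while-loop that accumulates 'OOO' by repeated concatenation with the closed form 'O' + 'OOO' * (step // 2).
import Mathlib
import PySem

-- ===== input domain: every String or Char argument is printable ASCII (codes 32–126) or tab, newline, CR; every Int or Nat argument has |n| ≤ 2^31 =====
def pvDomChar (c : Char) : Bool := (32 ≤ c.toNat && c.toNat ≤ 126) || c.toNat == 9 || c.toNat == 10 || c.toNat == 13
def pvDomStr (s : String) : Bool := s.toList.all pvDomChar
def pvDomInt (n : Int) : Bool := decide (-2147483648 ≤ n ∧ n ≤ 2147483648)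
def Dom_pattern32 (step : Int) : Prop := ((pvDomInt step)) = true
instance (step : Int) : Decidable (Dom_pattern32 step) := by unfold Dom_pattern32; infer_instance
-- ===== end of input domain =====

-- B replaces A's two-phase while-loop of string concatenations with the closed form
-- 'O' + 'OOO' * (step // 2); equal on all ints (simpler/constant-factor faster, return value only).

-- ===== PORT A =====
-- literal port of A's while-True loop; the string accumulator is a List Char, returned via String.ofList
def pattern32Loop (step : Int) (pattern : List Char) (i : Int) : List Char :=
  if _h1 : i > step then pattern
  else
    let pattern1 := pattern ++ "OOO".toList
    let i1 := i + 1
    if _h2 : i1 > step then pattern1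
    else pattern32Loop step (pattern1 ++ "".toList) (i1 + 1)
termination_by (step + 1 - i).toNat
decreasing_by omega

def pattern32 (step : Int) : String :=
  String.ofList (pattern32Loop step "O".toList 2)

-- ===== PORT B =====
def pattern32_alt (step : Int) : String :=
  String.ofList ("O".toList ++ PySem.List.pyRepeat "OOO".toList (PySem.Int.floordiv step 2))

-- ===== PRECONDITION & SPEC =====
def Spec_pattern32 (step : Int) (out : String) : Prop := out = pattern32_alt step
instance (step : Int) (out : String) : Decidable (Spec_pattern32 step out) := by unfold Spec_pattern32; infer_instance

-- ===== CLAIM (what is proved, stated in full; the proofs are below) =====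
def Claim_equal_pattern32 : Prop := ∀ (step : Int), Dom_pattern32 step → Spec_pattern32 step (pattern32 step)

-- ===== LEMMAS AND PROOFS =====

-- The loop from counter i appends (step - i + 2).toNat / 2 copies of "OOO".
theorem pattern32Loop_eq (step : Int) : ∀ (n : Nat) (i : Int) (p : List Char),
    (step + 1 - i).toNat = n →
    pattern32Loop step p i = p ++ (List.replicate ((step - i + 2).toNat / 2) "OOO".toList).flatten := by
  intro n
  induction n using Nat.strong_induction_on with
  | _ n ih =>
    intro i p hn
    rw [pattern32Loop]
    by_cases h1 : i > step
    · simp only [h1, dite_true]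
      have : (step - i + 2).toNat / 2 = 0 := by omega
      simp [this]
    · simp only [h1, dite_false]
      by_cases h2 : i + 1 > step
      · simp only [h2, dite_true]
        have : (step - i + 2).toNat / 2 = 1 := by omega
        simp [this]
      · simp only [h2, dite_false]
        rw [ih (step + 1 - (i + 1 + 1)).toNat (by omega) (i + 1 + 1) _ rfl]
        have hk : (step - i + 2).toNat / 2 = (step - (i + 1 + 1) + 2).toNat / 2 + 1 := by omega
        rw [hk, List.replicate_succ, List.flatten_cons]
        simp

-- ===== VERDICT (by name: the statement is the Claim_ definition above) =====
theorem pattern32_spec : Claim_equal_pattern32 := by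
  intro step _
  unfold Spec_pattern32 pattern32 pattern32_alt
  rw [pattern32Loop_eq step (step + 1 - 2).toNat 2 _ rfl]
  have h1 : PySem.List.pyRepeat "OOO".toList (PySem.Int.floordiv step 2)
      = (List.replicate (step.toNat / 2) "OOO".toList).flatten := by
    simp only [PySem.List.pyRepeat]
    congr 2
    have := PySem.Int.floordiv_mul_add_mod step 2
    have h0 := PySem.Int.mod_nonneg step (b := 2) (by omega)
    have h2 := PySem.Int.mod_lt step (b := 2) (by omega)
    omega
  rw [h1]
  have h2 : (step - 2 + 2).toNat / 2 = step.toNat / 2 := by omega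
  rw [h2]
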